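-- pv_equiv track=rewrite | github.com/szlx23/fabagent-rag | src/fabagent_rag/api.py | find_request_duplicate_sources
-- ===== SOURCE A (Python) =====
-- def find_request_duplicate_sources(sources: list[str]) -> list[str]:
--     """找出本次请求里重复出现的 source。"""
--
--     seen: set[str] = set()
--     duplicates: list[str] = []
--     for source in sources:
--         if source in seen and source not in duplicates:
--             duplicates.append(source)
--         seen.add(source)
--     return duplicates
-- ===== SOURCE B (Python) =====
-- def find_request_duplicate_sources(sources: list[str]) -> list[str]:
--     """找出本次请求里重复出现的 source。"""
--     return [s for i, s in enumerate(sources) if sources[:i].count(s) == 1]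
-- ===== Notes on version B (the rewrite author's own statement) =====
-- stated objective: simpler
-- what changed: Replaces A's stateful loop (seen-set plus linear duplicates-membership scan) with a stateless one-line comprehension that emits s at index i exactly when the prefix sources[:i] contains s exactly once.
import Mathlib
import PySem

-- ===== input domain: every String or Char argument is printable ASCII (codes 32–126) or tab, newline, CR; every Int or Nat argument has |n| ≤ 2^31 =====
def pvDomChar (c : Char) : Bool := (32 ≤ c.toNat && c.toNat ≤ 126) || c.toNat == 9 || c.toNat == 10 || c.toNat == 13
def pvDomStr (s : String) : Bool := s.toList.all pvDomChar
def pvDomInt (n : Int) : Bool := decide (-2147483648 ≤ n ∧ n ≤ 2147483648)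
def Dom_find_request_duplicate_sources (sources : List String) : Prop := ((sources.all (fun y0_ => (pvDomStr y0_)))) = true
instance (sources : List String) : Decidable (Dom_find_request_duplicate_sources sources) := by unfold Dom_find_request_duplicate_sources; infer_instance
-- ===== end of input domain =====

-- B replaces A's stateful seen-set + duplicates-membership loop with a stateless
-- comprehension emitting s at index i iff sources[:i] counts s exactly once (objective: simpler).


-- ===== PORT A =====
-- loop body of A: if source in seen and source not in duplicates: duplicates.append(source); seen.add(source)
def pvStepA (st : PySem.Set String × List String) (source : String) : PySem.Set String × List String :=
  let st' := if source ∈ st.1 ∧ source ∉ st.2 then (st.1, st.2 ++ [source]) else st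
  (PySem.Set.add st'.1 source, st'.2)

def find_request_duplicate_sources (sources : List String) : List String :=
  (sources.foldl pvStepA (PySem.Set.empty, [])).2

-- ===== PORT B =====
-- [s for i, s in enumerate(sources) if sources[:i].count(s) == 1]
def find_request_duplicate_sources_alt (sources : List String) : List String :=
  (PySem.List.enumerate sources 0).filterMap (fun p =>
    if (PySem.List.slice sources none (some p.1)).count p.2 = 1 then some p.2 else none)

-- ===== PRECONDITION & SPEC =====
def Spec_find_request_duplicate_sources (sources : List String) (out : List String) : Prop := out = find_request_duplicate_sources_alt sources
instance (sources : List String) (out : List String) : Decidable (Spec_find_request_duplicate_sources sources out) := by unfold Spec_find_request_duplicate_sources; infer_instance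

-- ===== CLAIM (what is proved, stated in full; the proofs are below) =====
def Claim_equal_find_request_duplicate_sources : Prop := ∀ (sources : List String), Dom_find_request_duplicate_sources sources → Spec_find_request_duplicate_sources sources (find_request_duplicate_sources sources)

-- ===== LEMMAS AND PROOFS =====

-- Loop invariant: with full = pref ++ rest already fixed, A's seen-set holds the sources
-- occurring in the processed prefix and its duplicates list those occurring at least twice;
-- then finishing A's fold over rest appends exactly B's emissions for indices ≥ |pref|.
theorem pv_fold_eq (full : List String) (rest : List String) : ∀ (pref : List String)
    (seen : PySem.Set String) (dups : List String),
    full = pref ++ rest →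
    (∀ s, s ∈ seen ↔ 1 ≤ pref.count s) →
    (∀ s, s ∈ dups ↔ 2 ≤ pref.count s) →
    (rest.foldl pvStepA (seen, dups)).2
      = dups ++ (PySem.List.enumerate rest (pref.length : Int)).filterMap
          (fun p => if (PySem.List.slice full none (some p.1)).count p.2 = 1 then some p.2 else none) := by
  induction rest with
  | nil => intro pref seen dups _ _ _; simp [PySem.List.enumerate]
  | cons x r ih =>
    intro pref seen dups hfull h1 h2
    have hslice : PySem.List.slice full none (some (pref.length : Int)) = pref := by
      rw [PySem.List.slice_to_natCast, hfull, List.take_left]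
    have hcount : ∀ s, (pref ++ [x]).count s = pref.count s + if x = s then 1 else 0 := by
      intro s
      simp [List.count_append, List.count_singleton]
    by_cases hc : pref.count x = 1
    · -- second occurrence of x: both sides emit x
      have hA : pvStepA (seen, dups) x = (PySem.Set.add seen x, dups ++ [x]) := by
        have hin : x ∈ seen := (h1 x).mpr (by omega)
        have hnd : x ∉ dups := fun h => by have := (h2 x).mp h; omega
        simp [pvStepA, hin, hnd]
      rw [List.foldl_cons, hA, PySem.List.enumerate_cons, List.filterMap_cons]
      rw [hslice]
      simp only [hc, if_true]
      have := ih (pref ++ [x]) (PySem.Set.add seen x) (dups ++ [x])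
        (by simpa using hfull)
        (by
          intro s
          rw [hcount s, PySem.Set.mem_add]
          by_cases hsx : x = s
          · subst hsx; simp
          · simp [hsx, Ne.symm hsx, h1 s])
        (by
          intro s
          rw [hcount s]
          by_cases hsx : x = s
          · subst hsx
            simp [hc]
          · simp only [List.mem_append, List.mem_singleton]
            constructor
            · rintro (h | h)
              · have := (h2 s).mp h; omega
              · exact absurd h.symm hsx
            · intro h
              left
              exact (h2 s).mpr (by simp [hsx] at h; omega))
      rw [this]
      simp [List.append_assoc]
    · -- not a second occurrence: neither side emits
      have hA : pvStepA (seen, dups) x = (PySem.Set.add seen x, dups) := by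
        have : ¬ (x ∈ seen ∧ x ∉ dups) := by
          rintro ⟨hin, hnd⟩
          have := (h1 x).mp hin
          have : ¬ 2 ≤ pref.count x := fun h => hnd ((h2 x).mpr h)
          omega
        simp [pvStepA, this]
      rw [List.foldl_cons, hA, PySem.List.enumerate_cons, List.filterMap_cons]
      rw [hslice]
      simp only [hc, if_false]
      have := ih (pref ++ [x]) (PySem.Set.add seen x) dups
        (by simpa using hfull)
        (by
          intro s
          rw [hcount s, PySem.Set.mem_add]
          by_cases hsx : x = s
          · subst hsx; simp
          · simp [hsx, Ne.symm hsx, h1 s])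
        (by
          intro s
          rw [hcount s]
          by_cases hsx : x = s
          · subst hsx
            simp only [if_true]
            rw [h2 x]
            omega
          · simp [hsx, h2 s])
      rw [this]
      simp

-- ===== VERDICT (by name: the statement is the Claim_ definition above) =====
theorem find_request_duplicate_sources_spec : Claim_equal_find_request_duplicate_sources := by
  intro sources _
  unfold Spec_find_request_duplicate_sources find_request_duplicate_sources find_request_duplicate_sources_alt
  have := pv_fold_eq sources sources [] PySem.Set.empty []
    (by simp) (by simp [PySem.Set.empty]) (by simp)
  simpa using this
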